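-- pv_equiv track=rewrite | github.com/dorittttt/ege2026 | homework variantik 25093318/9 21408.py | check
-- ===== SOURCE A (Python) =====
-- def check(row):
--     uniq = []
--     povt_2_3 = []
--     for i in row:
--         if row.count(i) == 1:
--             uniq.append(i)
--         if row.count(i) == 3:
--             povt_2_3.append(i)
--     sorted_povt = sorted(povt_2_3)
--     return len(povt_2_3) == 6 and len(uniq) == 1 and sorted_povt[-1] > uniq[0]
-- ===== SOURCE B (Python) =====
-- def check(row):
--     runs = []
--     for x in sorted(row):
--         if runs and runs[-1][0] == x:
--             runs[-1] = (x, runs[-1][1] + 1)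
--         else:
--             runs.append((x, 1))
--     triples = [v for v, c in runs if c == 3]
--     singletons = [v for v, c in runs if c == 1]
--     return len(triples) == 2 and len(singletons) == 1 and max(triples) > singletons[0]
-- ===== Notes on version B (the rewrite author's own statement) =====
-- stated objective: faster
-- what changed: Replaces A's per-element row.count scans (quadratic) by sorting a copy of the row and run-length-encoding consecutive equal elements in one pass, then reading off the runs of length 3 and 1.
import Mathlib
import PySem

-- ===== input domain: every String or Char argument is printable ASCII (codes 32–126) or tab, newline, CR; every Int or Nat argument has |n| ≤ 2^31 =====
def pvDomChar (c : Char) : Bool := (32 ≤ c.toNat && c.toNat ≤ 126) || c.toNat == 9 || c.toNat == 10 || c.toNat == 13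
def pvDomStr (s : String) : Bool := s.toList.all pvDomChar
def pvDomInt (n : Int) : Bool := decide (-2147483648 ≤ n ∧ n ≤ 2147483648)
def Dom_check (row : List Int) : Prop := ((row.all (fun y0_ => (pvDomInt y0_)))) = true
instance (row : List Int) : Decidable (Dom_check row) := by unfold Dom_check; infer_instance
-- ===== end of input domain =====

-- B sorts a copy of the row and run-length-encodes it in one pass, reading runs of
-- length 3 and 1 off the encoding, instead of A's per-element row.count scans (objective: faster).

-- ===== PORT A =====
def check (row : List Int) : Bool :=
  -- one loop appending to the two accumulators uniq (st.1) and povt_2_3 (st.2)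
  let st := row.foldl (fun (st : List Int × List Int) i =>
      (if row.count i = 1 then st.1 ++ [i] else st.1,
       if row.count i = 3 then st.2 ++ [i] else st.2)) ([], [])
  let sorted_povt := PySem.List.sorted st.2 (fun x => x)
  -- Python's `and` short-circuits, so the two indexings run only under the length tests;
  -- the `none` match arms are unreachable there (both lists are nonempty).
  if st.2.length = 6 then
    if st.1.length = 1 then
      match PySem.List.pyGet? sorted_povt (-1), PySem.List.pyGet? st.1 0 with
      | some a, some b => decide (b < a)
      | _, _ => false
    else false
  else false

-- ===== PORT B =====
-- the body of Source B's for-loop: merge x into the last run or start a new run of length 1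
def pvStep (runs : List (Int × Int)) (x : Int) : List (Int × Int) :=
  match runs.getLast? with
  | some p => if p.1 == x then runs.dropLast ++ [(x, p.2 + 1)] else runs ++ [(x, 1)]
  | none => runs ++ [(x, 1)]

def check_alt (row : List Int) : Bool :=
  let runs := (PySem.List.sorted row (fun x => x)).foldl pvStep []
  let triples := (runs.filter (fun p => p.2 == 3)).map (fun p => p.1)
  let singletons := (runs.filter (fun p => p.2 == 1)).map (fun p => p.1)
  -- `and` short-circuits: max(triples) and singletons[0] are only evaluated under the
  -- length tests, where both lists are nonempty, so the defaults 0 are unreachable.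
  if triples.length = 2 then
    if singletons.length = 1 then
      decide ((PySem.List.pyGetD singletons 0 0 : Int) < PySem.List.maxD triples (fun x : Int => x) 0)
    else false
  else false

-- ===== PRECONDITION & SPEC =====
def Spec_check (row : List Int) (out : Bool) : Prop := out = check_alt row
instance (row : List Int) (out : Bool) : Decidable (Spec_check row out) := by unfold Spec_check; infer_instance

-- ===== CLAIM (what is proved, stated in full; the proofs are below) =====
def Claim_equal_check : Prop := ∀ (row : List Int), Dom_check row → Spec_check row (check row)

-- ===== LEMMAS AND PROOFS =====

-- the filtered lists the two programs are about:
-- A builds pvUniq/pvPovt (elements of row with count 1 / 3, with multiplicity);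
-- B's runs yield the DISTINCT such values; pvSingles/pvTriples name those.
def pvUniq (row : List Int) : List Int := row.filter (fun x => decide (row.count x = 1))
def pvPovt (row : List Int) : List Int := row.filter (fun x => decide (row.count x = 3))
def pvTriples (row : List Int) : List Int := (PySem.Set.ofList row).filter (fun x => decide (row.count x = 3))
def pvSingles (row : List Int) : List Int := (PySem.Set.ofList row).filter (fun x => decide (row.count x = 1))

lemma mem_pvTriples (row : List Int) (x : Int) : x ∈ pvTriples row ↔ x ∈ pvPovt row := by
  simp [pvTriples, pvPovt, List.mem_filter, PySem.Set.mem_ofList]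

lemma pvUniq_nodup (row : List Int) : (pvUniq row).Nodup := by
  rw [List.nodup_iff_count_le_one]
  intro a
  by_cases h : row.count a = 1
  · calc (pvUniq row).count a ≤ row.count a := List.Sublist.count_le a List.filter_sublist
      _ ≤ 1 := by omega
  · have : a ∉ pvUniq row := by simp [pvUniq, List.mem_filter, h]
    simp [List.count_eq_zero_of_not_mem this]

lemma pvSingles_perm (row : List Int) : (pvSingles row).Perm (pvUniq row) := by
  apply (List.perm_ext_iff_of_nodup ((PySem.Set.nodup_ofList row).filter _) (pvUniq_nodup row)).mpr
  intro x
  simp [pvUniq, List.mem_filter, PySem.Set.mem_ofList]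

lemma pvPovt_len (row : List Int) : (pvPovt row).length = 3 * (pvTriples row).length := by
  have hperm : (pvPovt row).dedup.Perm (pvTriples row) := by
    apply (List.perm_ext_iff_of_nodup (List.nodup_dedup _) ((PySem.Set.nodup_ofList row).filter _)).mpr
    intro x
    rw [List.mem_dedup]
    exact (mem_pvTriples row x).symm
  have hsum := List.sum_map_count_dedup_eq_length (pvPovt row)
  have hc : ∀ x ∈ (pvPovt row).dedup, (pvPovt row).count x = 3 := by
    intro x hx
    rw [List.mem_dedup] at hx
    have hx' := hx
    unfold pvPovt at hx'
    have h3 : row.count x = 3 := of_decide_eq_true (List.mem_filter.mp hx').2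
    rw [pvPovt, List.count_filter (by simp [h3])]
    exact h3
  rw [List.map_congr_left hc] at hsum
  rw [← hsum, ← hperm.length_eq]
  simp [List.sum_replicate, Nat.mul_comm]

lemma pyGet_neg_one (s : List Int) (h : s ≠ []) :
    PySem.List.pyGet? s (-1) = some (s.getLast h) := by
  have hl : 0 < s.length := List.length_pos_of_ne_nil h
  simp only [PySem.List.pyGet?, PySem.List.pyIdx?]
  rw [if_neg (by omega : ¬ ((0:Int) ≤ -1)), if_pos (by omega : -((s.length:Int)) ≤ -1)]
  norm_num
  simp [List.getLast_eq_getElem]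

lemma pvMax_eq (row : List Int) (hne : pvPovt row ≠ []) :
    PySem.List.pyGet? (PySem.List.sorted (pvPovt row) (fun x => x)) (-1)
      = PySem.List.max? (pvTriples row) (fun x => x) := by
  have hperm := PySem.List.sorted_perm (pvPovt row) (fun x => x) false
  have hsne : PySem.List.sorted (pvPovt row) (fun x => x) ≠ [] := by
    intro h
    exact hne (List.Perm.nil_eq (h ▸ hperm)).symm
  have hTne : pvTriples row ≠ [] := by
    obtain ⟨x, hx⟩ := List.exists_mem_of_ne_nil _ hne
    intro h
    exact (List.not_mem_nil (a := x)) (h ▸ (mem_pvTriples row x).mpr hx)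
  obtain ⟨m, hm⟩ : ∃ m, PySem.List.max? (pvTriples row) (fun x => x) = some m := by
    cases h : PySem.List.max? (pvTriples row) (fun x => x) with
    | none => exact absurd ((PySem.List.max?_eq_none_iff _ _).mp h) hTne
    | some m => exact ⟨m, rfl⟩
  rw [hm, pyGet_neg_one _ hsne]
  congr 1
  have hlast_mem : (PySem.List.sorted (pvPovt row) (fun x => x)).getLast hsne ∈ pvPovt row :=
    hperm.mem_iff.mp (List.getLast_mem hsne)
  have h1 : (PySem.List.sorted (pvPovt row) (fun x => x)).getLast hsne ≤ m :=
    PySem.List.max?_isMax hm _ ((mem_pvTriples row _).mpr hlast_mem)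
  have hm_mem : m ∈ PySem.List.sorted (pvPovt row) (fun x => x) :=
    hperm.mem_iff.mpr ((mem_pvTriples row m).mp (PySem.List.max?_mem hm))
  obtain ⟨j, hj, hje⟩ := List.mem_iff_getElem.mp hm_mem
  have h2 : m ≤ (PySem.List.sorted (pvPovt row) (fun x => x)).getLast hsne := by
    rw [List.getLast_eq_getElem]
    calc m = (PySem.List.sorted (pvPovt row) (fun x => x))[j] := hje.symm
      _ ≤ _ := PySem.List.sorted_id_getElem_mono (pvPovt row) (by omega) (by omega)
  exact le_antisymm h1 h2

-- ---- run-length encoding facts for B ----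

-- left-recursive run-length encoder: rleL v c l = the runs of (v^c ++ l) given v^c is the open run
def pvRleL (v : Int) (c : Int) : List Int → List (Int × Int)
  | [] => [(v, c)]
  | x :: xs => if v == x then pvRleL v (c + 1) xs else (v, c) :: pvRleL x 1 xs

-- pvStep only inspects and edits the last run, so a nonempty accumulator's prefix is inert
lemma pvStep_foldl_concat (l : List Int) (acc : List (Int × Int)) (v c : Int) :
    l.foldl pvStep (acc ++ [(v, c)]) = acc ++ l.foldl pvStep [(v, c)] := by
  induction l generalizing acc v c with
  | nil => rfl
  | cons x xs ih =>
    simp only [List.foldl_cons, pvStep, List.getLast?_concat, List.dropLast_concat,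
      List.getLast?_singleton]
    by_cases h : (v == x) = true
    · rw [if_pos h, if_pos h]
      have hd : (([(v, c)].dropLast ++ [(x, c + 1)] : List (Int × Int))) = [(x, c + 1)] := rfl
      rw [hd, ih acc x (c + 1)]
    · rw [if_neg h, if_neg h]
      rw [ih (acc ++ [(v, c)]) x 1, ih [(v, c)] x 1]
      simp [List.append_assoc]

lemma pvStep_foldl_eq_rleL (l : List Int) (v c : Int) :
    l.foldl pvStep [(v, c)] = pvRleL v c l := by
  induction l generalizing v c with
  | nil => rfl
  | cons x xs ih =>
    simp only [List.foldl_cons, pvStep, List.getLast?_singleton, pvRleL]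
    by_cases h : (v == x) = true
    · have hvx : v = x := by simpa using h
      subst hvx
      rw [if_pos h, if_pos h]
      have hd : (([(v, c)].dropLast ++ [(v, c + 1)] : List (Int × Int))) = [(v, c + 1)] := rfl
      rw [hd, ih v (c + 1)]
    · rw [if_neg h, if_neg h, pvStep_foldl_concat xs [(v, c)] x 1, ih x 1]
      rfl

lemma pvRleL_spec (xs : List Int) (v c : Int) (hs : (v :: xs).Pairwise (· ≤ ·)) :
    (∀ y, y ∈ (pvRleL v c xs).map Prod.fst ↔ y ∈ v :: xs)
    ∧ ((pvRleL v c xs).map Prod.fst).Nodup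
    ∧ (∀ p ∈ pvRleL v c xs,
        p.2 = (if p.1 = v then c - 1 else 0) + (((v :: xs).count p.1 : Nat) : Int)) := by
  induction xs generalizing v c with
  | nil =>
    refine ⟨by simp [pvRleL], by simp [pvRleL], ?_⟩
    intro p hp
    simp only [pvRleL, List.mem_singleton] at hp
    subst hp
    simp
  | cons x xs ih =>
    by_cases hvx : v = x
    · -- merge into the open run
      subst hvx
      have hs' : (v :: xs).Pairwise (· ≤ ·) := by
        rcases List.pairwise_cons.mp hs with ⟨h1, h2⟩
        exact List.pairwise_cons.mpr ⟨fun y hy => h1 y (List.mem_cons_of_mem _ hy),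
          (List.pairwise_cons.mp h2).2⟩
      obtain ⟨ihm, ihn, ihc⟩ := ih v (c + 1) hs'
      have hrw : pvRleL v c (v :: xs) = pvRleL v (c + 1) xs := by simp [pvRleL]
      refine ⟨?_, hrw ▸ ihn, ?_⟩
      · intro y
        rw [hrw, ihm]
        simp
      · intro p hp
        rw [hrw] at hp
        have h2 := ihc p hp
        by_cases hpv : p.1 = v
        · rw [if_pos hpv] at h2 ⊢
          rw [hpv] at h2 ⊢
          simp only [List.count_cons_self] at h2 ⊢
          push_cast at h2 ⊢
          omega
        · rw [if_neg hpv] at h2 ⊢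
          rw [List.count_cons_of_ne (Ne.symm hpv)]
          exact h2
    · -- new run starts at x; sortedness gives v < x ≤ everything in xs, so v ∉ x :: xs
      have hvle : ∀ y ∈ x :: xs, v ≤ y := (List.pairwise_cons.mp hs).1
      have hs' : (x :: xs).Pairwise (· ≤ ·) := (List.pairwise_cons.mp hs).2
      have hvnot : v ∉ x :: xs := by
        intro hmem
        rcases List.mem_cons.mp hmem with h | h
        · exact hvx h
        · have hxv : x ≤ v := (List.pairwise_cons.mp hs').1 v h
          have hvx' : v ≤ x := hvle x (List.mem_cons_self)
          exact hvx (le_antisymm hvx' hxv)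
      obtain ⟨ihm, ihn, ihc⟩ := ih x 1 hs'
      have hrw : pvRleL v c (x :: xs) = (v, c) :: pvRleL x 1 xs := by
        simp [pvRleL, hvx]
      refine ⟨?_, ?_, ?_⟩
      · intro y
        rw [hrw]
        simp only [List.map_cons, List.mem_cons, ihm]
      · rw [hrw, List.map_cons, List.nodup_cons]
        exact ⟨fun h => hvnot ((ihm v).mp h), ihn⟩
      · intro p hp
        rw [hrw] at hp
        rcases List.mem_cons.mp hp with h | h
        · subst h
          have hcv : List.count v (v :: x :: xs) = 1 := by
            rw [List.count_cons_self, List.count_eq_zero_of_not_mem hvnot]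
          simp only [hcv]
          simp
        · have hp1 : p.1 ∈ x :: xs := (ihm p.1).mp (List.mem_map_of_mem h)
          have hp1v : p.1 ≠ v := fun he => hvnot (he ▸ hp1)
          have h2 := ihc p h
          rw [if_neg hp1v, List.count_cons_of_ne (Ne.symm hp1v)]
          by_cases hpx : p.1 = x
          · rw [if_pos hpx] at h2
            omega
          · rw [if_neg hpx] at h2
            omega

-- the runs Source B builds, and their three facts over the original row
def pvRuns (row : List Int) : List (Int × Int) :=
  (PySem.List.sorted row (fun x => x)).foldl pvStep []

lemma pvRuns_spec (row : List Int) :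
    (∀ y, y ∈ (pvRuns row).map Prod.fst ↔ y ∈ row)
    ∧ ((pvRuns row).map Prod.fst).Nodup
    ∧ (∀ p ∈ pvRuns row, p.2 = ((row.count p.1 : Nat) : Int)) := by
  have hperm := PySem.List.sorted_perm row (fun x => x) false
  have hpw : (PySem.List.sorted row (fun x => x)).Pairwise (· ≤ ·) := by
    simpa using PySem.List.sorted_pairwise row (fun x => x)
  cases hsl : PySem.List.sorted row (fun x => x) with
  | nil =>
    have hr : row = [] := (List.Perm.nil_eq (hsl ▸ hperm)).symm
    subst hr
    simp [pvRuns, hsl]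
  | cons x xs =>
    have hruns : pvRuns row = pvRleL x 1 xs := by
      simp only [pvRuns, hsl, List.foldl_cons]
      have h0 : pvStep [] x = [(x, 1)] := rfl
      rw [h0, pvStep_foldl_eq_rleL]
    rw [hsl] at hpw hperm
    obtain ⟨hm, hn, hc⟩ := pvRleL_spec xs x 1 hpw
    refine ⟨?_, hruns ▸ hn, ?_⟩
    · intro y
      rw [hruns, hm, hperm.mem_iff]
    · intro p hp
      rw [hruns] at hp
      have h2 := hc p hp
      rw [← hperm.count_eq p.1]
      by_cases hpx : p.1 = x
      · rw [if_pos hpx] at h2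
        omega
      · rw [if_neg hpx] at h2
        omega

-- comparing an Int-cast count against a numeral with ==
lemma pvBeq_int (c : Nat) (k : Nat) : (((c : Int)) == ((k : Nat) : Int)) = decide (c = k) := by
  rw [beq_eq_decide, decide_eq_decide]
  omega

lemma pvFilterB_perm (row : List Int) (k : Nat) :
    (((pvRuns row).filter (fun p => p.2 == (k : Int))).map (fun p => p.1)).Perm
      ((PySem.Set.ofList row).filter (fun x => decide (row.count x = k))) := by
  obtain ⟨hm, hn, hc⟩ := pvRuns_spec row
  have hnodup : (((pvRuns row).filter (fun p => p.2 == (k : Int))).map (fun p => p.1)).Nodup :=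
    hn.sublist ((List.filter_sublist (l := pvRuns row)).map Prod.fst)
  apply (List.perm_ext_iff_of_nodup hnodup ((PySem.Set.nodup_ofList row).filter _)).mpr
  intro y
  simp only [List.mem_filter, PySem.Set.mem_ofList, List.mem_map]
  constructor
  · rintro ⟨p, ⟨hp1, hp2⟩, rfl⟩
    refine ⟨(hm p.1).mp (List.mem_map_of_mem hp1), ?_⟩
    rw [hc p hp1, pvBeq_int] at hp2
    exact hp2
  · rintro ⟨hy, hk⟩
    obtain ⟨p, hp, hpe⟩ := List.mem_map.mp ((hm y).mpr hy)
    refine ⟨p, ⟨hp, ?_⟩, hpe⟩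
    rw [hc p hp, hpe, pvBeq_int]
    exact hk

-- first extremal values agree for lists with the same members
lemma pvMax_eq_of_same_mem (xs ys : List Int) (h : ∀ a, a ∈ xs ↔ a ∈ ys) :
    PySem.List.max? xs (fun x => x) = PySem.List.max? ys (fun x => x) := by
  cases hx : PySem.List.max? xs (fun x => x) with
  | none =>
    have : xs = [] := (PySem.List.max?_eq_none_iff _ _).mp hx
    subst this
    cases hy : PySem.List.max? ys (fun x => x) with
    | none => rfl
    | some m =>
      have := PySem.List.max?_mem hy
      rw [← h] at this
      simp at this
  | some m1 =>
    cases hy : PySem.List.max? ys (fun x => x) with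
    | none =>
      have : ys = [] := (PySem.List.max?_eq_none_iff _ _).mp hy
      subst this
      have := PySem.List.max?_mem hx
      rw [h] at this
      simp at this
    | some m2 =>
      congr 1
      have h1 : m1 ≤ m2 := PySem.List.max?_isMax hy _ ((h m1).mp (PySem.List.max?_mem hx))
      have h2 : m2 ≤ m1 := PySem.List.max?_isMax hx _ ((h m2).mpr (PySem.List.max?_mem hy))
      exact le_antisymm h1 h2

-- ===== VERDICT (by name: the statement is the Claim_ definition above) =====
theorem check_spec : Claim_equal_check := by
  intro row _
  unfold Spec_check
  simp only [check, check_alt,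
      PySem.List.foldl_prod_mk
        (f := fun acc i => if row.count i = 1 then acc ++ [i] else acc)
        (g := fun acc i => if row.count i = 3 then acc ++ [i] else acc),
      PySem.List.foldl_append_ite_eq_filter,
      List.nil_append]
  have hu : row.filter (fun x => decide (row.count x = 1)) = pvUniq row := rfl
  have hp : row.filter (fun x => decide (row.count x = 3)) = pvPovt row := rfl
  rw [hu, hp]
  have hT : ((((PySem.List.sorted row (fun x => x)).foldl pvStep []).filter
      (fun p => p.2 == (3:Int))).map (fun p => p.1)).Perm (pvTriples row) := pvFilterB_perm row 3
  have hS : ((((PySem.List.sorted row (fun x => x)).foldl pvStep []).filter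
      (fun p => p.2 == (1:Int))).map (fun p => p.1)).Perm (pvSingles row) := pvFilterB_perm row 1
  have hTlen := hT.length_eq
  have hSlen := hS.length_eq
  have hlen := pvPovt_len row
  have hU := (pvSingles_perm row).length_eq
  rw [hTlen, hSlen]
  by_cases h6 : (pvPovt row).length = 6
  · rw [if_pos h6, if_pos (show (pvTriples row).length = 2 by omega)]
    by_cases h1 : (pvUniq row).length = 1
    · rw [if_pos h1, if_pos (show (pvSingles row).length = 1 by omega)]
      obtain ⟨a, ha⟩ := List.length_eq_one_iff.mp h1
      have hsgB : (((PySem.List.sorted row (fun x => x)).foldl pvStep []).filter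
          (fun p => p.2 == (1:Int))).map (fun p => p.1) = [a] := by
        apply List.perm_singleton.mp
        rw [← ha]
        exact hS.trans (pvSingles_perm row)
      have hne : pvPovt row ≠ [] := by
        intro h; rw [h] at h6; simp at h6
      have hBne : (((PySem.List.sorted row (fun x => x)).foldl pvStep []).filter
          (fun p => p.2 == (3:Int))).map (fun p => p.1) ≠ [] := by
        intro h
        rw [h] at hTlen
        simp at hTlen
        omega
      rw [ha, hsgB, pvMax_eq row hne,
          pvMax_eq_of_same_mem (pvTriples row) _ (fun y => (hT.mem_iff (a := y)).symm),
          PySem.List.max?_eq_some_maxD _ _ 0 hBne]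
      simp [PySem.List.pyGet?, PySem.List.pyIdx?, PySem.List.pyGetD_zero_cons]
    · rw [if_neg h1, if_neg (show ¬ (pvSingles row).length = 1 by omega)]
  · rw [if_neg h6, if_neg (show ¬ (pvTriples row).length = 2 by omega)]
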